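-- pv_equiv track=rewrite | github.com/justinkemersion/bachelor-pressure-cooker-manual | tools/print/compile_print_bundle.py | _wrap_recipe_phases
-- ===== SOURCE A (Python) =====
-- def _wrap_recipe_phases(md: str) -> str:
--     """
--     Wrap recipe phases in a non-breaking container so a phase won't split across pages.
--
--     We wrap sections that start with a line like:
--       ### Phase 1: ...
--     up to (but not including) the next '### Phase' or the first PAGE_BREAK marker.
--
--     This is deliberately conservative and only targets recipes (called only for 03_recipes/).
--     """
--     lines = md.splitlines(keepends=True)
--     out: list[str] = []
--
--     in_phase = False
--     for line in lines:
--         # If we hit a major section header, end the current phase block.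
--         # This avoids accidentally wrapping Phase N + everything after it (common in older recipes without PAGE_BREAK).
--         if in_phase and (line.startswith("## ") or line.startswith("# ")):
--             out.append("</div>\n")
--             in_phase = False
--             out.append(line)
--             continue
--
--         # Stop phase wrapping at the recipe's front/back boundary.
--         if "<!-- PAGE_BREAK -->" in line:
--             if in_phase:
--                 out.append("</div>\n")
--                 in_phase = False
--             out.append(line)
--             continue
--
--         # Start a new phase block.
--         if line.startswith("### Phase "):
--             if in_phase:
--                 out.append("</div>\n")
--             # IMPORTANT: markdown="1" allows Python-Markdown to parse markdown inside this HTML block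
--             # (paired with the 'md_in_html' extension in _render_html()).
--             out.append('<div class="phase" markdown="1">\n')
--             in_phase = True
--             out.append(line)
--             continue
--
--         out.append(line)
--
--     if in_phase:
--         out.append("</div>\n")
--
--     return "".join(out)
-- ===== SOURCE B (Python) =====
-- def _wrap_recipe_phases(md: str) -> str:
--     """Two-pass re-implementation: first record phase-start and phase-close line
--     indices, then rebuild the document inserting the div tags at those indices."""
--     lines = md.splitlines(keepends=True)
--     OPEN = '<div class="phase" markdown="1">\n'
--     CLOSE = "</div>\n"
--
--     # Pass 1: collect boundary indices.
--     starts = []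
--     ends = []
--     open_since = None
--     for i, ln in enumerate(lines):
--         brk = "<!-- PAGE_BREAK -->" in ln
--         term = brk or ln.startswith("## ") or ln.startswith("# ")
--         start = (not brk) and ln.startswith("### Phase ")
--         if open_since is not None and (term or start):
--             ends.append(i)
--             open_since = None
--         if start:
--             starts.append(i)
--             open_since = i
--     if open_since is not None:
--         ends.append(len(lines))
--
--     # Pass 2: rebuild with insertions.
--     sset, eset = set(starts), set(ends)
--     out = []
--     for i, ln in enumerate(lines):
--         if i in eset:
--             out.append(CLOSE)
--         if i in sset:
--             out.append(OPEN)
--         out.append(ln)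
--     if len(lines) in eset:
--         out.append(CLOSE)
--     return "".join(out)
-- ===== Notes on version B (the rewrite author's own statement) =====
-- stated objective: alternative
-- what changed: Replaces A's single stateful emit-as-you-go loop by a two-pass scheme: pass 1 records the phase-start and phase-close line indices (closing at the first later header/PAGE_BREAK/phase-start line or EOF), pass 2 rebuilds the document inserting the open/close div tags at those recorded indices.
import Mathlib
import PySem

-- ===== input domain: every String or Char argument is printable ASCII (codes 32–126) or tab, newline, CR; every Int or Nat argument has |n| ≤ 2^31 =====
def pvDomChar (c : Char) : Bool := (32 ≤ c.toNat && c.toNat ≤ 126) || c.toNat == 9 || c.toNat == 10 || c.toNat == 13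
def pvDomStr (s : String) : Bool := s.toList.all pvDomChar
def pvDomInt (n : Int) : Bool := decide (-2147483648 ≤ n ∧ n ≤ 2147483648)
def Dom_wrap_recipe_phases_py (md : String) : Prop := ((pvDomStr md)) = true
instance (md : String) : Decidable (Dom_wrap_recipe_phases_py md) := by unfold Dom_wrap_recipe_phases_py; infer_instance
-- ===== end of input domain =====

-- B: two-pass re-implementation (pass 1 records phase-start/close line indices, pass 2 rebuilds inserting the tags); objective: alternative decomposition.

-- ===== PORT A =====
def pvOpenTag : List Char := "<div class=\"phase\" markdown=\"1\">\n".toList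
def pvCloseTag : List Char := "</div>\n".toList
def pvMarker : List Char := "<!-- PAGE_BREAK -->".toList

-- shared builtin: md.splitlines(keepends=True). Exact on the Dom alphabet, where the only
-- line boundaries are '\n', '\r' and '\r\n' (Python's further boundary characters lie outside Dom).
def pySplitlinesKeep : List Char → List (List Char)
  | [] => []
  | '\r' :: '\n' :: rest => (['\r', '\n']) :: pySplitlinesKeep rest
  | '\n' :: rest => ['\n'] :: pySplitlinesKeep rest
  | '\r' :: rest => ['\r'] :: pySplitlinesKeep rest
  | c :: rest => pvSplitCons c (pySplitlinesKeep rest)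
where
  -- prepend an ordinary character to the first line (or start the unterminated last line)
  pvSplitCons (c : Char) : List (List Char) → List (List Char)
  | [] => [[c]]
  | l :: ls => (c :: l) :: ls

-- A's loop body, branches in A's order; state = (out, in_phase)
def pvAstep (st : List (List Char) × Bool) (line : List Char) : List (List Char) × Bool :=
  if st.2 && (PySem.Chars.startswith line "## ".toList || PySem.Chars.startswith line "# ".toList) then
    (st.1 ++ [pvCloseTag, line], false)
  else if PySem.Chars.isIn pvMarker line then
    ((if st.2 then st.1 ++ [pvCloseTag] else st.1) ++ [line], false)
  else if PySem.Chars.startswith line "### Phase ".toList then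
    ((if st.2 then st.1 ++ [pvCloseTag] else st.1) ++ [pvOpenTag, line], true)
  else (st.1 ++ [line], st.2)

def wrap_recipe_phases_py (md : String) : String :=
  let lines := pySplitlinesKeep md.toList
  let st := lines.foldl pvAstep ([], false)
  String.mk (if st.2 then st.1 ++ [pvCloseTag] else st.1).flatten

-- ===== PORT B =====
-- pass 1 of Source B: collect phase-start indices and close indices (open_since is the Option state);
-- the trailing `if open_since is not None: ends.append(len(lines))` is the base case.
def pvScan : List (List Char) → Nat → Option Nat → List Nat × List Nat
  | [], i, op => ([], if op.isSome then [i] else [])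
  | ln :: rest, i, op =>
    let brk := PySem.Chars.isIn pvMarker ln
    let term := brk || PySem.Chars.startswith ln "## ".toList || PySem.Chars.startswith ln "# ".toList
    let start := !brk && PySem.Chars.startswith ln "### Phase ".toList
    let closeHere := op.isSome && (term || start)
    let op' := if start then some i else if closeHere then none else op
    let se := pvScan rest (i + 1) op'
    ((if start then i :: se.1 else se.1), (if closeHere then i :: se.2 else se.2))

-- pass 2 of Source B: rebuild inserting the tags; the base case is the post-loop `len(lines) in eset` check.
def pvBuild (s e : List Nat) : List (List Char) → Nat → List (List Char)
  | [], i => if i ∈ e then [pvCloseTag] else []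
  | ln :: rest, i =>
    (if i ∈ e then [pvCloseTag] else []) ++ (if i ∈ s then [pvOpenTag] else []) ++ ln :: pvBuild s e rest (i + 1)

def wrap_recipe_phases_py_alt (md : String) : String :=
  let lines := pySplitlinesKeep md.toList
  let se := pvScan lines 0 none
  String.mk (pvBuild se.1 se.2 lines 0).flatten

-- ===== PRECONDITION & SPEC =====
def Spec_wrap_recipe_phases_py (md : String) (out : String) : Prop := out = wrap_recipe_phases_py_alt md
instance (md : String) (out : String) : Decidable (Spec_wrap_recipe_phases_py md out) := by unfold Spec_wrap_recipe_phases_py; infer_instance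

-- ===== CLAIM (what is proved, stated in full; the proofs are below) =====
def Claim_equal_wrap_recipe_phases_py : Prop := ∀ (md : String), Dom_wrap_recipe_phases_py md → Spec_wrap_recipe_phases_py md (wrap_recipe_phases_py md)

-- ===== LEMMAS AND PROOFS =====

-- common recursive description of the emitted lines, following A's branch order
def pvOnepass : List (List Char) → Bool → List (List Char)
  | [], inp => if inp then [pvCloseTag] else []
  | ln :: rest, inp =>
    if inp && (PySem.Chars.startswith ln "## ".toList || PySem.Chars.startswith ln "# ".toList) then
      pvCloseTag :: ln :: pvOnepass rest false
    else if PySem.Chars.isIn pvMarker ln then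
      (if inp then [pvCloseTag] else []) ++ ln :: pvOnepass rest false
    else if PySem.Chars.startswith ln "### Phase ".toList then
      (if inp then [pvCloseTag] else []) ++ pvOpenTag :: ln :: pvOnepass rest true
    else ln :: pvOnepass rest inp

theorem pvA_fold : ∀ (lines : List (List Char)) (out : List (List Char)) (inp : Bool),
    (if (List.foldl pvAstep (out, inp) lines).2 then (List.foldl pvAstep (out, inp) lines).1 ++ [pvCloseTag]
     else (List.foldl pvAstep (out, inp) lines).1) = out ++ pvOnepass lines inp := by
  intro lines
  induction lines with
  | nil => intro out inp; cases inp <;> simp [pvOnepass]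
  | cons ln rest ih =>
    intro out inp
    have step := ih (pvAstep (out, inp) ln).1 (pvAstep (out, inp) ln).2
    rw [Prod.mk.eta] at step
    rw [List.foldl_cons, step]
    simp only [pvAstep, pvOnepass]
    cases inp <;> split_ifs <;> simp_all [List.append_assoc]

theorem pvScan_ge : ∀ (lines : List (List Char)) (i : Nat) (op : Option Nat),
    (∀ j ∈ (pvScan lines i op).1, i ≤ j) ∧ (∀ j ∈ (pvScan lines i op).2, i ≤ j) := by
  intro lines
  induction lines with
  | nil => intro i op; cases op <;> simp [pvScan]
  | cons ln rest ih =>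
    intro i op
    have key : ∀ (X : Option Nat),
        (∀ j ∈ (pvScan rest (i+1) X).1, i ≤ j) ∧ (∀ j ∈ (pvScan rest (i+1) X).2, i ≤ j) :=
      fun X => ⟨fun j hj => le_trans (Nat.le_succ i) ((ih (i+1) X).1 j hj),
                fun j hj => le_trans (Nat.le_succ i) ((ih (i+1) X).2 j hj)⟩
    simp only [pvScan]
    constructor <;> intro j hj <;> split_ifs at hj <;>
      first
        | exact (key _).1 j hj
        | exact (key _).2 j hj
        | (rcases List.mem_cons.mp hj with rfl | hj
           · exact le_rfl
           · first
              | exact (key _).1 j hj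
              | exact (key _).2 j hj)

theorem pvBuild_congr : ∀ (lines : List (List Char)) (i : Nat) (s s' e e' : List Nat),
    (∀ k, i ≤ k → (k ∈ s ↔ k ∈ s')) → (∀ k, i ≤ k → (k ∈ e ↔ k ∈ e')) →
    pvBuild s e lines i = pvBuild s' e' lines i := by
  intro lines
  induction lines with
  | nil =>
    intro i s s' e e' hs he
    simp only [pvBuild]
    rw [if_congr (he i le_rfl) rfl rfl]
  | cons ln rest ih =>
    intro i s s' e e' hs he
    simp only [pvBuild]
    rw [if_congr (he i le_rfl) rfl rfl, if_congr (hs i le_rfl) rfl rfl,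
        ih (i+1) s s' e e' (fun k hk => hs k (by omega)) (fun k hk => he k (by omega))]

-- a phase-start line is never a header line (third resp. second character differs)
theorem pvPhs_not_hdr (ln : List Char) (h : PySem.Chars.startswith ln "### Phase ".toList = true) :
    PySem.Chars.startswith ln "## ".toList = false ∧ PySem.Chars.startswith ln "# ".toList = false := by
  simp only [PySem.Chars.startswith, Bool.eq_false_iff, ne_eq, List.isPrefixOf_iff_prefix] at h ⊢
  constructor
  · intro hc
    have e1 := h.getElem (i := 2) (by simp)
    have e2 := hc.getElem (i := 2) (by simp)
    simp at e1 e2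
    exact absurd (e1.trans e2.symm) (by decide)
  · intro hc
    have e1 := h.getElem (i := 1) (by simp)
    have e2 := hc.getElem (i := 1) (by simp)
    simp at e1 e2
    exact absurd (e1.trans e2.symm) (by decide)

theorem pvB_eq : ∀ (lines : List (List Char)) (i : Nat) (op : Option Nat),
    pvBuild (pvScan lines i op).1 (pvScan lines i op).2 lines i = pvOnepass lines op.isSome := by
  intro lines
  induction lines with
  | nil => intro i op; cases op <;> simp [pvScan, pvBuild, pvOnepass]
  | cons ln rest ih =>
    intro i op
    have hs_notmem : ∀ X : Option Nat, i ∉ (pvScan rest (i+1) X).1 := fun X hm => by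
      have := (pvScan_ge rest (i+1) X).1 i hm; omega
    have he_notmem : ∀ X : Option Nat, i ∉ (pvScan rest (i+1) X).2 := fun X hm => by
      have := (pvScan_ge rest (i+1) X).2 i hm; omega
    have tail0 : ∀ X : Option Nat,
        pvBuild (pvScan rest (i+1) X).1 (pvScan rest (i+1) X).2 rest (i+1) = pvOnepass rest X.isSome :=
      ih (i+1)
    have drop_s : ∀ (X : Option Nat) (e : List Nat),
        pvBuild (i :: (pvScan rest (i+1) X).1) e rest (i+1) = pvBuild (pvScan rest (i+1) X).1 e rest (i+1) := by
      intro X e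
      refine pvBuild_congr rest (i+1) _ _ e e (fun k hk => ?_) (fun k hk => Iff.rfl)
      simp only [List.mem_cons]
      constructor
      · rintro (rfl | hm)
        · omega
        · exact hm
      · intro hm; exact Or.inr hm
    have drop_e : ∀ (X : Option Nat) (s : List Nat),
        pvBuild s (i :: (pvScan rest (i+1) X).2) rest (i+1) = pvBuild s (pvScan rest (i+1) X).2 rest (i+1) := by
      intro X s
      refine pvBuild_congr rest (i+1) s s _ _ (fun k hk => Iff.rfl) (fun k hk => ?_)
      simp only [List.mem_cons]
      constructor
      · rintro (rfl | hm)
        · omega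
        · exact hm
      · intro hm; exact Or.inr hm
    simp only [pvScan, pvBuild]
    by_cases hp : PySem.Chars.startswith ln ['#', '#', '#', ' ', 'P', 'h', 'a', 's', 'e', ' '] = true
    · obtain ⟨e2, e1⟩ := pvPhs_not_hdr ln hp
      have e2' : PySem.Chars.startswith ln ['#', '#', ' '] = false := e2
      have e1' : PySem.Chars.startswith ln ['#', ' '] = false := e1
      cases op <;> by_cases hb : PySem.Chars.isIn pvMarker ln = true <;>
        simp [pvOnepass, hp, e1', e2', hb, hs_notmem, he_notmem, drop_s, drop_e, tail0]
    · cases op <;> by_cases hb : PySem.Chars.isIn pvMarker ln = true <;>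
        by_cases hA : PySem.Chars.startswith ln ['#', '#', ' '] = true <;>
        by_cases hB : PySem.Chars.startswith ln ['#', ' '] = true <;>
        simp [pvOnepass, hp, hA, hB, hb, hs_notmem, he_notmem, drop_e, tail0]

-- ===== VERDICT (by name: the statement is the Claim_ definition above) =====
theorem wrap_recipe_phases_py_spec : Claim_equal_wrap_recipe_phases_py := by
  intro md _
  unfold Spec_wrap_recipe_phases_py wrap_recipe_phases_py wrap_recipe_phases_py_alt
  simp only
  rw [pvB_eq (pySplitlinesKeep md.toList) 0 none]
  have hA := pvA_fold (pySplitlinesKeep md.toList) [] false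
  simp only [Option.isSome_none]
  rw [hA]
  simp
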